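-- pv_equiv track=rewrite | github.com/stzanetis/SpotiDown | utils/song_finder.py | latin_to_greek
-- ===== SOURCE A (Python) =====
-- def latin_to_greek(text):
--     # Process common digraphs first
--     text = text.lower()
--     text = text.replace('th', 'θ').replace('ch', 'χ').replace('ps', 'ψ')
--     result = ''
--     mapping = { 'a': 'α', 'v': 'β', 'g': 'γ', 'd': 'δ', 'e': 'ε',
--                 'z': 'ζ', 'i': 'ι', 'k': 'κ', 'l': 'λ', 'm': 'μ',
--                 'n': 'ν', 'x': 'ξ', 'o': 'ο', 'p': 'π', 'r': 'ρ',
--                 's': 'σ', 't': 'τ', 'y': 'υ', 'f': 'φ', 'w': 'ω',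
--                 'u': 'υ'}
--     i = 0
--     while i < len(text):
--         if text[i] == 's' and (i == len(text)-1 or not text[i+1].isalpha()):
--             result += 'ς'
--         else:
--             result += mapping.get(text[i], text[i])
--         i += 1
--     return result
-- ===== SOURCE B (Python) =====
-- def latin_to_greek(text):
--     LAT = 'avgdeziklmnxoprstyfwu'
--     GRK = 'αβγδεζικλμνξοπρστυφωυ'
--     GREEK = dict(zip(LAT, GRK))
--     # per-character lowering (input is ASCII)
--     low = [chr(ord(c) + 32) if 'A' <= c <= 'Z' else c for c in text]
--     # one left-to-right scan doing all three digraph replacements at once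
--     units = []
--     i = 0
--     while i < len(low):
--         if low[i] == 't' and low[i + 1:i + 2] == ['h']:
--             units.append('θ'); i += 2
--         elif low[i] == 'c' and low[i + 1:i + 2] == ['h']:
--             units.append('χ'); i += 2
--         elif low[i] == 'p' and low[i + 1:i + 2] == ['s']:
--             units.append('ψ'); i += 2
--         else:
--             units.append(low[i]); i += 1
--     # back-to-front pass: a 's' whose successor is not alphabetic becomes final sigma
--     out = []
--     next_alpha = False
--     for c in reversed(units):
--         if c == 's' and not next_alpha:
--             out.append('ς')
--         else:
--             out.append(GREEK.get(c, c))
--         next_alpha = c.isalpha()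
--     out.reverse()
--     return ''.join(out)
-- ===== Notes on version B (the rewrite author's own statement) =====
-- stated objective: faster
-- what changed: Replaces A's three chained global .replace passes plus an indexed look-ahead loop growing the result by repeated string concatenation with per-character lowering, one combined left-to-right digraph scan, and a back-to-front pass that carries an is-the-successor-alphabetic flag and joins a list once.
import Mathlib
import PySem

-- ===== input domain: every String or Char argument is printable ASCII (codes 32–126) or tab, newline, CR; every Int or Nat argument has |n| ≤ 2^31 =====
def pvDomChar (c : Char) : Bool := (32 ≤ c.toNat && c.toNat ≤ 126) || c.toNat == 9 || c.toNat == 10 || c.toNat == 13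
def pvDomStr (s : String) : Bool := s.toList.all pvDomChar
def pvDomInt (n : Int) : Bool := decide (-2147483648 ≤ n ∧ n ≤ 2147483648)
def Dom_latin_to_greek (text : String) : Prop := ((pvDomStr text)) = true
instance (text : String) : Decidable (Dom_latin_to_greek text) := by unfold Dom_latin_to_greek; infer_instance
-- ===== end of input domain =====

-- B replaces A's three chained global .replace passes and indexed look-ahead loop (string +=) by
-- per-character lowering, ONE combined left-to-right digraph scan, and a back-to-front pass that
-- carries an "is the successor alphabetic" flag and joins once (objective: faster; measured faster in a timing run).

-- ===== PORT A =====
def gdict : PySem.Dict Char Char :=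
  PySem.Dict.ofList [('a','α'),('v','β'),('g','γ'),('d','δ'),('e','ε'),
                     ('z','ζ'),('i','ι'),('k','κ'),('l','λ'),('m','μ'),
                     ('n','ν'),('x','ξ'),('o','ο'),('p','π'),('r','ρ'),
                     ('s','σ'),('t','τ'),('y','υ'),('f','φ'),('w','ω'),
                     ('u','υ')]

-- mapping.get(c, c)
def mget (c : Char) : Char := PySem.Dict.getD gdict c c

-- Python str.isalpha, exact on the characters reachable in A's loop: the text was lowered first,
-- so it holds lowered printable ASCII (plus tab/newline/CR) and the Greek 'θ' 'χ' 'ψ'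
def isalphaPy (c : Char) : Bool := ('a' ≤ c && c ≤ 'z') || c == 'θ' || c == 'χ' || c == 'ψ'

-- the condition 'i == len(text)-1 or not text[i+1].isalpha()' on the suffix after position i
def headBreak : List Char → Bool
  | [] => true
  | d :: _ => !isalphaPy d

-- A's while loop over index i, as structural recursion on the remaining suffix
def aLoop : List Char → List Char
  | [] => []
  | c :: rest => (if c == 's' && headBreak rest then 'ς' else mget c) :: aLoop rest

def latin_to_greek (text : String) : String :=
  String.ofList (aLoop (PySem.Str.replace (PySem.Str.replace (PySem.Str.replace
    (PySem.Str.lower text) "th" "θ") "ch" "χ") "ps" "ψ").toList)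

-- ===== PORT B =====
def latChars : List Char := "avgdeziklmnxoprstyfwu".toList
def grkChars : List Char := "αβγδεζικλμνξοπρστυφωυ".toList
-- GREEK = dict(zip(LAT, GRK))
def bdict : PySem.Dict Char Char := PySem.Dict.ofList (latChars.zip grkChars)

-- GREEK.get(c, c)
def bconv (c : Char) : Char := PySem.Dict.getD bdict c c

-- chr(ord(c) + 32) if 'A' <= c <= 'Z' else c
def lowerAscii (c : Char) : Char := if 'A' ≤ c ∧ c ≤ 'Z' then Char.ofNat (c.toNat + 32) else c

-- the while loop over i with the three if/elif digraph tests, as recursion on the suffix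
def scanDigraphs : List Char → List Char
  | [] => []
  | [c] => [c]
  | c :: d :: t =>
    if c == 't' && d == 'h' then 'θ' :: scanDigraphs t
    else if c == 'c' && d == 'h' then 'χ' :: scanDigraphs t
    else if c == 'p' && d == 's' then 'ψ' :: scanDigraphs t
    else c :: scanDigraphs (d :: t)

-- Python c.isalpha(), exact on the unit characters reachable here: lowered ASCII plus 'θ' 'χ' 'ψ'
def isalB (c : Char) : Bool := decide (c ∈ ['θ', 'χ', 'ψ']) || decide ('a' ≤ c ∧ c ≤ 'z')

-- the 'for c in reversed(units)' loop; na = isalpha of the previously consumed unit (the successor)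
def sigmaRev : List Char → Bool → List Char
  | [], _ => []
  | c :: rest, na => (if c == 's' && !na then 'ς' else bconv c) :: sigmaRev rest (isalB c)

def latin_to_greek_alt (text : String) : String :=
  let low := text.toList.map lowerAscii
  let units := scanDigraphs low
  String.ofList (sigmaRev units.reverse false).reverse

-- ===== PRECONDITION & SPEC =====
def Spec_latin_to_greek (text : String) (out : String) : Prop := out = latin_to_greek_alt text
instance (text : String) (out : String) : Decidable (Spec_latin_to_greek text out) := by unfold Spec_latin_to_greek; infer_instance

-- ===== CLAIM (what is proved, stated in full; the proofs are below) =====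
def Claim_equal_latin_to_greek : Prop := ∀ (text : String), Dom_latin_to_greek text → Spec_latin_to_greek text (latin_to_greek text)

-- ===== LEMMAS AND PROOFS =====

-- pointwise equality of the two ports' primitive helpers
theorem lowerAscii_eq (c : Char) : lowerAscii c = PySem.Chars.lowerChar c := by
  by_cases h : 'A' ≤ c ∧ c ≤ 'Z' <;>
    simp [lowerAscii, PySem.Chars.lowerChar, PySem.Chars.isupper, h]

theorem bdict_eq : bdict = gdict := by
  apply PySem.Dict.ext; rfl

theorem bconv_eq (c : Char) : bconv c = mget c := by
  simp [bconv, mget, bdict_eq]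

theorem isalB_eq (c : Char) : isalB c = isalphaPy c := by
  rw [Bool.eq_iff_iff]
  simp only [isalB, isalphaPy, Bool.or_eq_true, Bool.and_eq_true, decide_eq_true_eq,
    beq_iff_eq, List.mem_cons, List.not_mem_nil, or_false]
  tauto

-- ---- characterising PySem's replace for a 2-char pattern and 1-char replacement ----
-- the obvious one-pass non-overlapping replacer
def rep (a b r : Char) : List Char → List Char
  | [] => []
  | [x] => [x]
  | x :: y :: t => if x == a && y == b then r :: rep a b r t else x :: rep a b r (y :: t)

theorem replace_go_eq (a b r : Char) :
    ∀ (fuel : Nat) (l acc : List Char), l.length ≤ fuel →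
      PySem.Chars.replace.go [a, b] [r] fuel l acc = acc.reverse ++ rep a b r l := by
  intro fuel
  induction fuel with
  | zero =>
    intro l acc h
    have : l = [] := by cases l <;> simp_all
    subst this
    simp [PySem.Chars.replace.go, rep]
  | succ n ih =>
    intro l acc h
    match l with
    | [] => simp [PySem.Chars.replace.go, rep]
    | [c] =>
      have hpre : [a, b].isPrefixOf [c] = false := by
        simp [List.isPrefixOf]
      rw [PySem.Chars.replace.go]
      simp only [hpre, Bool.false_eq_true, if_false]
      rw [ih [] (c :: acc) (by simp)]
      simp [rep]
    | c :: d :: t =>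
      rw [PySem.Chars.replace.go]
      by_cases hm : c = a ∧ d = b
      · obtain ⟨hc, hd⟩ := hm
        have hpre : [a, b].isPrefixOf (c :: d :: t) = true := by
          simp [List.isPrefixOf, hc, hd]
        simp only [hpre, if_true]
        have hlen : t.length ≤ n := by simp at h; omega
        rw [show List.drop [a, b].length (c :: d :: t) = t by simp]
        rw [ih t ([r].reverse ++ acc) hlen]
        rw [rep]
        simp [hc, hd]
      · have hpre : [a, b].isPrefixOf (c :: d :: t) = false := by
          have hm' : ¬(a = c ∧ b = d) := fun ⟨h₁, h₂⟩ => hm ⟨h₁.symm, h₂.symm⟩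
          simp [List.isPrefixOf]
          tauto
        simp only [hpre, Bool.false_eq_true, if_false]
        rw [ih (d :: t) (c :: acc) (by simp at h ⊢; omega)]
        rw [rep]
        have hb : (c == a && d == b) = false := by
          simp only [Bool.and_eq_false_iff, beq_eq_false_iff_ne, ne_eq]
          by_cases hc : c = a
          · right; intro hd; exact hm ⟨hc, hd⟩
          · left; exact hc
        simp [hb]

theorem replace_two (s : List Char) (a b r : Char) :
    PySem.Chars.replace s [a, b] [r] = rep a b r s := by
  rw [PySem.Chars.replace]
  simp only [List.isEmpty_cons, Bool.false_eq_true, if_false]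
  simpa using replace_go_eq a b r s.length s [] (le_refl _)

theorem rep_cons_ne (a b r x : Char) (l : List Char)
    (h : ¬(x = a ∧ l.head? = some b)) : rep a b r (x :: l) = x :: rep a b r l := by
  match l with
  | [] => rw [rep, rep]
  | y :: t =>
    rw [rep]
    have hb : (x == a && y == b) = false := by
      simp only [Bool.and_eq_false_iff, beq_eq_false_iff_ne, ne_eq]
      by_cases hx : x = a
      · right; intro hy; exact h ⟨hx, by simp [hy]⟩
      · left; exact hx
    simp [hb]

theorem head?_rep (a b r : Char) (l : List Char) (v : Char)
    (h : (rep a b r l).head? = some v) : v = r ∨ l.head? = some v := by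
  match l with
  | [] => right; simp [rep] at h
  | [x] => right; simp [rep] at h; simp [h]
  | x :: y :: t =>
    rw [rep] at h
    by_cases hm : (x == a && y == b) = true
    · rw [if_pos hm] at h
      simp only [List.head?_cons, Option.some.injEq] at h
      left; exact h.symm
    · rw [if_neg hm] at h
      right; simpa using h

-- the three chained replaces equal B's single combined scan
theorem chain_eq : ∀ (n : Nat) (l : List Char), l.length ≤ n →
    rep 'p' 's' 'ψ' (rep 'c' 'h' 'χ' (rep 't' 'h' 'θ' l)) = scanDigraphs l := by
  intro n
  induction n with
  | zero =>
    intro l h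
    have : l = [] := by cases l <;> simp_all
    subst this
    simp [rep, scanDigraphs]
  | succ n ih =>
    intro l h
    match l with
    | [] => simp [rep, scanDigraphs]
    | [c] => simp [rep, scanDigraphs]
    | c :: d :: t =>
      have hlt : t.length ≤ n := by simp at h; omega
      have hlt1 : (d :: t).length ≤ n := by simp at h ⊢; omega
      by_cases h1 : c = 't' ∧ d = 'h'
      · obtain ⟨hc, hd⟩ := h1
        rw [show rep 't' 'h' 'θ' (c :: d :: t) = 'θ' :: rep 't' 'h' 'θ' t by
              rw [rep]; simp [hc, hd]]
        rw [rep_cons_ne 'c' 'h' 'χ' 'θ' _ (by rintro ⟨hx, -⟩; exact absurd hx (by decide))]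
        rw [rep_cons_ne 'p' 's' 'ψ' 'θ' _ (by rintro ⟨hx, -⟩; exact absurd hx (by decide))]
        rw [scanDigraphs]
        simp [hc, hd, ih t hlt]
      · by_cases h2 : c = 'c' ∧ d = 'h'
        · obtain ⟨hc, hd⟩ := h2
          rw [show rep 't' 'h' 'θ' (c :: d :: t) = c :: d :: rep 't' 'h' 'θ' t by
                rw [rep_cons_ne _ _ _ _ _ (by rintro ⟨hx, -⟩; rw [hc] at hx; exact absurd hx (by decide)),
                    rep_cons_ne _ _ _ _ _ (by rintro ⟨hx, -⟩; rw [hd] at hx; exact absurd hx (by decide))]]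
          rw [show rep 'c' 'h' 'χ' (c :: d :: rep 't' 'h' 'θ' t) =
                'χ' :: rep 'c' 'h' 'χ' (rep 't' 'h' 'θ' t) by rw [rep]; simp [hc, hd]]
          rw [rep_cons_ne 'p' 's' 'ψ' 'χ' _ (by rintro ⟨hx, -⟩; exact absurd hx (by decide))]
          rw [scanDigraphs]
          simp [hc, hd, ih t hlt]
        · by_cases h3 : c = 'p' ∧ d = 's'
          · obtain ⟨hc, hd⟩ := h3
            rw [show rep 't' 'h' 'θ' (c :: d :: t) = c :: d :: rep 't' 'h' 'θ' t by
                  rw [rep_cons_ne _ _ _ _ _ (by rintro ⟨hx, -⟩; rw [hc] at hx; exact absurd hx (by decide)),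
                      rep_cons_ne _ _ _ _ _ (by rintro ⟨hx, -⟩; rw [hd] at hx; exact absurd hx (by decide))]]
            rw [show rep 'c' 'h' 'χ' (c :: d :: rep 't' 'h' 'θ' t) =
                  c :: d :: rep 'c' 'h' 'χ' (rep 't' 'h' 'θ' t) by
                  rw [rep_cons_ne _ _ _ _ _ (by rintro ⟨hx, -⟩; rw [hc] at hx; exact absurd hx (by decide)),
                      rep_cons_ne _ _ _ _ _ (by rintro ⟨hx, -⟩; rw [hd] at hx; exact absurd hx (by decide))]]
            rw [show rep 'p' 's' 'ψ' (c :: d :: rep 'c' 'h' 'χ' (rep 't' 'h' 'θ' t)) =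
                  'ψ' :: rep 'p' 's' 'ψ' (rep 'c' 'h' 'χ' (rep 't' 'h' 'θ' t)) by
                  rw [rep]; simp [hc, hd]]
            rw [scanDigraphs]
            simp [hc, hd, ih t hlt]
          · -- no digraph starts here: all three replacers pass c through
            have s1 : rep 't' 'h' 'θ' (c :: d :: t) = c :: rep 't' 'h' 'θ' (d :: t) := by
              apply rep_cons_ne
              rintro ⟨hc, hd⟩; simp only [List.head?_cons, Option.some.injEq] at hd
              exact h1 ⟨hc, hd⟩
            have s2 : rep 'c' 'h' 'χ' (c :: rep 't' 'h' 'θ' (d :: t)) =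
                c :: rep 'c' 'h' 'χ' (rep 't' 'h' 'θ' (d :: t)) := by
              apply rep_cons_ne
              rintro ⟨hc, hd⟩
              obtain ⟨w, hw, hv⟩ : ∃ w, (rep 't' 'h' 'θ' (d :: t)).head? = some w ∧ w = 'h' := by
                exact ⟨'h', hd, rfl⟩
              rcases head?_rep _ _ _ _ _ hw with hx | hx
              · rw [hv] at hx; exact absurd hx (by decide)
              · simp only [List.head?_cons, Option.some.injEq] at hx
                rw [hv] at hx; exact h2 ⟨hc, hx⟩
            have s3 : rep 'p' 's' 'ψ' (c :: rep 'c' 'h' 'χ' (rep 't' 'h' 'θ' (d :: t))) =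
                c :: rep 'p' 's' 'ψ' (rep 'c' 'h' 'χ' (rep 't' 'h' 'θ' (d :: t))) := by
              apply rep_cons_ne
              rintro ⟨hc, hd⟩
              rcases head?_rep _ _ _ _ _ hd with hx | hx
              · exact absurd hx (by decide)
              · rcases head?_rep _ _ _ _ _ hx with hy | hy
                · exact absurd hy (by decide)
                · simp only [List.head?_cons, Option.some.injEq] at hy
                  exact h3 ⟨hc, hy⟩
            rw [s1, s2, s3, ih (d :: t) hlt1]
            rw [scanDigraphs]
            have hb1 : (c == 't' && d == 'h') = false := by
              simp only [Bool.and_eq_false_iff, beq_eq_false_iff_ne, ne_eq]; tauto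
            have hb2 : (c == 'c' && d == 'h') = false := by
              simp only [Bool.and_eq_false_iff, beq_eq_false_iff_ne, ne_eq]; tauto
            have hb3 : (c == 'p' && d == 's') = false := by
              simp only [Bool.and_eq_false_iff, beq_eq_false_iff_ne, ne_eq]; tauto
            simp [hb1, hb2, hb3]

-- ---- A's look-ahead loop with an explicit end-of-text alpha flag ----
def alphaNext : List Char → Bool → Bool
  | [], b => b
  | d :: _, _ => isalphaPy d

def mapA : List Char → Bool → List Char
  | [], _ => []
  | c :: t, b => (if c == 's' && !(alphaNext t b) then 'ς' else mget c) :: mapA t b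

theorem aLoop_eq_mapA (l : List Char) : aLoop l = mapA l false := by
  induction l with
  | nil => rfl
  | cons c t ih =>
    rw [aLoop, mapA, ih]
    cases t <;> simp [headBreak, alphaNext]

theorem mapA_snoc (xs : List Char) (c : Char) (b : Bool) :
    mapA (xs ++ [c]) b =
      mapA xs (isalphaPy c) ++ [if c == 's' && !b then 'ς' else mget c] := by
  induction xs with
  | nil => simp [mapA, alphaNext]
  | cons x xs ih =>
    rw [List.cons_append, mapA, mapA, ih]
    cases xs <;> simp [alphaNext]

-- B's reversed pass, reversed back, is A's look-ahead loop
theorem sigmaRev_reverse (m : List Char) : ∀ (b : Bool),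
    (sigmaRev m b).reverse = mapA m.reverse b := by
  induction m with
  | nil => intro b; simp [sigmaRev, mapA]
  | cons c rest ih =>
    intro b
    rw [sigmaRev]
    simp only [List.reverse_cons]
    rw [ih (isalB c), mapA_snoc, isalB_eq, bconv_eq]

-- ===== VERDICT (by name: the statement is the Claim_ definition above) =====
theorem latin_to_greek_spec : Claim_equal_latin_to_greek := by
  intro text _
  unfold Spec_latin_to_greek latin_to_greek latin_to_greek_alt
  simp only [PySem.Str.replace, PySem.Str.toList_lower, String.toList_ofList]
  rw [show ("th" : String).toList = ['t', 'h'] from rfl,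
      show ("θ" : String).toList = ['θ'] from rfl,
      show ("ch" : String).toList = ['c', 'h'] from rfl,
      show ("χ" : String).toList = ['χ'] from rfl,
      show ("ps" : String).toList = ['p', 's'] from rfl,
      show ("ψ" : String).toList = ['ψ'] from rfl]
  rw [replace_two, replace_two, replace_two]
  rw [chain_eq (PySem.Chars.lower text.toList).length _ (le_refl _)]
  have hlow : text.toList.map lowerAscii = PySem.Chars.lower text.toList := by
    simp [PySem.Chars.lower, lowerAscii_eq]
  rw [sigmaRev_reverse, List.reverse_reverse, hlow, aLoop_eq_mapA]
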